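-- pv_equiv track=rewrite | github.com/Two-Kay/AoC | 2020/Day 6/SleepyCustoms.py | count_group_or
-- ===== SOURCE A (Python) =====
-- def count_group_or(group=None):
--     '''
--     How not to do it:
--
--     Count up all the occurances one-by-one (because someone underestimated the task)
--
--     Returns the sum for each letter that has occured within in a group
--     (not the total numbers of letters).
--     '''
--     a = 0
--     b = 0
--     c = 0
--     d = 0
--     e = 0
--     f = 0
--     g = 0
--     h = 0
--     i = 0
--     j = 0
--     k = 0
--     l = 0
--     m = 0
--     n = 0
--     o = 0
--     p = 0
--     q = 0
--     r = 0
--     s = 0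
--     t = 0
--     u = 0
--     v = 0
--     w = 0
--     x = 0
--     y = 0
--     z = 0
--
--     for firstIteration in range(len(group)):
--         answers = group[firstIteration]
--
--         for secondIteration in range(len(answers)):
--
--             if(answers[secondIteration]=="a"):
--                 a = 1
--             elif(answers[secondIteration]=="b"):
--                 b = 1
--             elif(answers[secondIteration]=="c"):
--                 c = 1
--             elif(answers[secondIteration]=="d"):
--                 d = 1
--             elif(answers[secondIteration]=="e"):
--                 e = 1
--             elif(answers[secondIteration]=="f"):
--                 f = 1
--             elif(answers[secondIteration]=="g"):
--                 g = 1
--             elif(answers[secondIteration]=="h"):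
--                 h = 1
--             elif(answers[secondIteration]=="i"):
--                 i = 1
--             elif(answers[secondIteration]=="j"):
--                 j = 1
--             elif(answers[secondIteration]=="k"):
--                 k = 1
--             elif(answers[secondIteration]=="l"):
--                 l = 1
--             elif(answers[secondIteration]=="m"):
--                 m = 1
--             elif(answers[secondIteration]=="n"):
--                 n = 1
--             elif(answers[secondIteration]=="o"):
--                 o = 1
--             elif(answers[secondIteration]=="p"):
--                 p = 1
--             elif(answers[secondIteration]=="q"):
--                 q = 1
--             elif(answers[secondIteration]=="r"):
--                 r = 1
--             elif(answers[secondIteration]=="s"):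
--                 s = 1
--             elif(answers[secondIteration]=="t"):
--                 t = 1
--             elif(answers[secondIteration]=="u"):
--                 u = 1
--             elif(answers[secondIteration]=="v"):
--                 v = 1
--             elif(answers[secondIteration]=="w"):
--                 w = 1
--             elif(answers[secondIteration]=="x"):
--                 x = 1
--             elif(answers[secondIteration]=="y"):
--                 y = 1
--             elif(answers[secondIteration]=="z"):
--                 z = 1
--
--     return(a+b+c+d+e+f+g+h+i+j+k+l+m+n+o+p+q+r+s+t+u+v+w+x+y+z)
-- ===== SOURCE B (Python) =====
-- ALPHABET = "abcdefghijklmnopqrstuvwxyz"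
--
--
-- def count_group_or(group=None):
--     # Inverted traversal: for each alphabet letter, query whether any
--     # string of the group contains it, and count the letters that do.
--     return sum(1 for letter in ALPHABET if any(letter in s for s in group))
-- ===== Notes on version B (the rewrite author's own statement) =====
-- stated objective: simpler
-- what changed: Inverted the traversal: instead of one pass over every character marking 26 flags via an if/elif chain, B loops over the 26 alphabet letters and counts those for which any string of the group contains that letter.
import Mathlib
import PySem

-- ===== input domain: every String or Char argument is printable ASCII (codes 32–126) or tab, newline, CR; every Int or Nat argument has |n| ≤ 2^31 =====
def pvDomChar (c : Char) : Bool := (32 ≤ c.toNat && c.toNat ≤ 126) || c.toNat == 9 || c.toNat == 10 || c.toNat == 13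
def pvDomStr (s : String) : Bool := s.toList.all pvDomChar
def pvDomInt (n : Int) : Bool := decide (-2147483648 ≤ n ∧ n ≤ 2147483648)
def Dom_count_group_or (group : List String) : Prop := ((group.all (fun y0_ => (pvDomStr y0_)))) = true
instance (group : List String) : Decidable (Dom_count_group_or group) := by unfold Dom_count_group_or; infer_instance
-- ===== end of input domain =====

-- B inverts the traversal: instead of one pass over every character marking 26 flags, it loops over
-- the 26 alphabet letters and counts those contained in some string of the group (simpler, same cost).

-- ===== PORT A =====
structure FlagsA where
  a : Int
  b : Int
  c : Int
  d : Int
  e : Int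
  f : Int
  g : Int
  h : Int
  i : Int
  j : Int
  k : Int
  l : Int
  m : Int
  n : Int
  o : Int
  p : Int
  q : Int
  r : Int
  s : Int
  t : Int
  u : Int
  v : Int
  w : Int
  x : Int
  y : Int
  z : Int
deriving DecidableEq, Repr

def initA : FlagsA := ⟨0, 0, 0, 0, 0, 0, 0, 0, 0, 0, 0, 0, 0, 0, 0, 0, 0, 0, 0, 0, 0, 0, 0, 0, 0, 0⟩

def stepA (st : FlagsA) (ch : Char) : FlagsA :=
  if ch = 'a' then { st with a := 1 }
    else if ch = 'b' then { st with b := 1 }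
    else if ch = 'c' then { st with c := 1 }
    else if ch = 'd' then { st with d := 1 }
    else if ch = 'e' then { st with e := 1 }
    else if ch = 'f' then { st with f := 1 }
    else if ch = 'g' then { st with g := 1 }
    else if ch = 'h' then { st with h := 1 }
    else if ch = 'i' then { st with i := 1 }
    else if ch = 'j' then { st with j := 1 }
    else if ch = 'k' then { st with k := 1 }
    else if ch = 'l' then { st with l := 1 }
    else if ch = 'm' then { st with m := 1 }
    else if ch = 'n' then { st with n := 1 }
    else if ch = 'o' then { st with o := 1 }
    else if ch = 'p' then { st with p := 1 }
    else if ch = 'q' then { st with q := 1 }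
    else if ch = 'r' then { st with r := 1 }
    else if ch = 's' then { st with s := 1 }
    else if ch = 't' then { st with t := 1 }
    else if ch = 'u' then { st with u := 1 }
    else if ch = 'v' then { st with v := 1 }
    else if ch = 'w' then { st with w := 1 }
    else if ch = 'x' then { st with x := 1 }
    else if ch = 'y' then { st with y := 1 }
    else if ch = 'z' then { st with z := 1 }
    else st

def retA (st : FlagsA) : Int :=
  st.a + st.b + st.c + st.d + st.e + st.f + st.g + st.h + st.i + st.j + st.k + st.l + st.m + st.n + st.o + st.p + st.q + st.r + st.s + st.t + st.u + st.v + st.w + st.x + st.y + st.z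

def count_group_or (group : List String) : Int :=
  retA (
    (PySem.List.pyRange 0 (PySem.List.len group) 1).foldl
      (fun st firstIteration =>
        let answers := PySem.List.pyGetD group firstIteration ""
        (PySem.List.pyRange 0 (PySem.Str.len answers) 1).foldl
          (fun st secondIteration => stepA st (PySem.List.pyGetD answers.toList secondIteration ' '))
          st)
      initA)

-- ===== PORT B =====
-- ALPHABET, as the list of its characters (iteration over a Python string yields its characters)
def alphabet : List Char := ['a', 'b', 'c', 'd', 'e', 'f', 'g', 'h', 'i', 'j', 'k', 'l', 'm', 'n', 'o', 'p', 'q', 'r', 's', 't', 'u', 'v', 'w', 'x', 'y', 'z']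

-- sum(1 for letter in ALPHABET if any(letter in s for s in group))
def count_group_or_alt (group : List String) : Int :=
  alphabet.foldl
    (fun acc letter =>
      if group.any (fun s => PySem.Str.isIn (String.ofList [letter]) s) then acc + 1 else acc)
    0

-- ===== PRECONDITION & SPEC =====
def Spec_count_group_or (group : List String) (out : Int) : Prop := out = count_group_or_alt group
instance (group : List String) (out : Int) : Decidable (Spec_count_group_or group out) := by unfold Spec_count_group_or; infer_instance

-- ===== CLAIM =====
def Claim_equal_count_group_or : Prop := ∀ (group : List String), Dom_count_group_or group → Spec_count_group_or group (count_group_or group)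

-- ===== LEMMAS AND PROOFS =====
theorem char_eq_of_toNat {c d : Char} (h : c.toNat = d.toNat) : c = d := by
  apply Char.ext; exact UInt32.toNat_inj.mp h

theorem mem_alphabet (c : Char) : c ∈ alphabet ↔ (97 ≤ c.toNat ∧ c.toNat ≤ 122) := by
  constructor
  · intro h
    fin_cases h <;> exact ⟨by decide, by decide⟩
  · rintro ⟨hlo, hhi⟩
    have hd : c.toNat = 97 ∨ c.toNat = 98 ∨ c.toNat = 99 ∨ c.toNat = 100 ∨ c.toNat = 101 ∨ c.toNat = 102 ∨ c.toNat = 103 ∨ c.toNat = 104 ∨ c.toNat = 105 ∨ c.toNat = 106 ∨ c.toNat = 107 ∨ c.toNat = 108 ∨ c.toNat = 109 ∨ c.toNat = 110 ∨ c.toNat = 111 ∨ c.toNat = 112 ∨ c.toNat = 113 ∨ c.toNat = 114 ∨ c.toNat = 115 ∨ c.toNat = 116 ∨ c.toNat = 117 ∨ c.toNat = 118 ∨ c.toNat = 119 ∨ c.toNat = 120 ∨ c.toNat = 121 ∨ c.toNat = 122 := by omega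
    rcases hd with h|h|h|h|h|h|h|h|h|h|h|h|h|h|h|h|h|h|h|h|h|h|h|h|h|h <;>
      first |
      (rw [char_eq_of_toNat (c := c) (d := 'a') (by rw [h]; decide)]; decide) |
      (rw [char_eq_of_toNat (c := c) (d := 'b') (by rw [h]; decide)]; decide) |
      (rw [char_eq_of_toNat (c := c) (d := 'c') (by rw [h]; decide)]; decide) |
      (rw [char_eq_of_toNat (c := c) (d := 'd') (by rw [h]; decide)]; decide) |
      (rw [char_eq_of_toNat (c := c) (d := 'e') (by rw [h]; decide)]; decide) |
      (rw [char_eq_of_toNat (c := c) (d := 'f') (by rw [h]; decide)]; decide) |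
      (rw [char_eq_of_toNat (c := c) (d := 'g') (by rw [h]; decide)]; decide) |
      (rw [char_eq_of_toNat (c := c) (d := 'h') (by rw [h]; decide)]; decide) |
      (rw [char_eq_of_toNat (c := c) (d := 'i') (by rw [h]; decide)]; decide) |
      (rw [char_eq_of_toNat (c := c) (d := 'j') (by rw [h]; decide)]; decide) |
      (rw [char_eq_of_toNat (c := c) (d := 'k') (by rw [h]; decide)]; decide) |
      (rw [char_eq_of_toNat (c := c) (d := 'l') (by rw [h]; decide)]; decide) |
      (rw [char_eq_of_toNat (c := c) (d := 'm') (by rw [h]; decide)]; decide) |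
      (rw [char_eq_of_toNat (c := c) (d := 'n') (by rw [h]; decide)]; decide) |
      (rw [char_eq_of_toNat (c := c) (d := 'o') (by rw [h]; decide)]; decide) |
      (rw [char_eq_of_toNat (c := c) (d := 'p') (by rw [h]; decide)]; decide) |
      (rw [char_eq_of_toNat (c := c) (d := 'q') (by rw [h]; decide)]; decide) |
      (rw [char_eq_of_toNat (c := c) (d := 'r') (by rw [h]; decide)]; decide) |
      (rw [char_eq_of_toNat (c := c) (d := 's') (by rw [h]; decide)]; decide) |
      (rw [char_eq_of_toNat (c := c) (d := 't') (by rw [h]; decide)]; decide) |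
      (rw [char_eq_of_toNat (c := c) (d := 'u') (by rw [h]; decide)]; decide) |
      (rw [char_eq_of_toNat (c := c) (d := 'v') (by rw [h]; decide)]; decide) |
      (rw [char_eq_of_toNat (c := c) (d := 'w') (by rw [h]; decide)]; decide) |
      (rw [char_eq_of_toNat (c := c) (d := 'x') (by rw [h]; decide)]; decide) |
      (rw [char_eq_of_toNat (c := c) (d := 'y') (by rw [h]; decide)]; decide) |
      (rw [char_eq_of_toNat (c := c) (d := 'z') (by rw [h]; decide)]; decide)

def ofMem (cs : List Char) : FlagsA where
  a := if 'a' ∈ cs then 1 else 0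
  b := if 'b' ∈ cs then 1 else 0
  c := if 'c' ∈ cs then 1 else 0
  d := if 'd' ∈ cs then 1 else 0
  e := if 'e' ∈ cs then 1 else 0
  f := if 'f' ∈ cs then 1 else 0
  g := if 'g' ∈ cs then 1 else 0
  h := if 'h' ∈ cs then 1 else 0
  i := if 'i' ∈ cs then 1 else 0
  j := if 'j' ∈ cs then 1 else 0
  k := if 'k' ∈ cs then 1 else 0
  l := if 'l' ∈ cs then 1 else 0
  m := if 'm' ∈ cs then 1 else 0
  n := if 'n' ∈ cs then 1 else 0
  o := if 'o' ∈ cs then 1 else 0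
  p := if 'p' ∈ cs then 1 else 0
  q := if 'q' ∈ cs then 1 else 0
  r := if 'r' ∈ cs then 1 else 0
  s := if 's' ∈ cs then 1 else 0
  t := if 't' ∈ cs then 1 else 0
  u := if 'u' ∈ cs then 1 else 0
  v := if 'v' ∈ cs then 1 else 0
  w := if 'w' ∈ cs then 1 else 0
  x := if 'x' ∈ cs then 1 else 0
  y := if 'y' ∈ cs then 1 else 0
  z := if 'z' ∈ cs then 1 else 0

theorem ofMem_append_not_letter (cs : List Char) (ch : Char)
    (h : ¬ (97 ≤ ch.toNat ∧ ch.toNat ≤ 122)) : ofMem (cs ++ [ch]) = ofMem cs := by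
  have na : 'a' ≠ ch := by rintro rfl; exact h (by decide)
  have nb : 'b' ≠ ch := by rintro rfl; exact h (by decide)
  have nc : 'c' ≠ ch := by rintro rfl; exact h (by decide)
  have nd : 'd' ≠ ch := by rintro rfl; exact h (by decide)
  have ne : 'e' ≠ ch := by rintro rfl; exact h (by decide)
  have nf : 'f' ≠ ch := by rintro rfl; exact h (by decide)
  have ng : 'g' ≠ ch := by rintro rfl; exact h (by decide)
  have nh : 'h' ≠ ch := by rintro rfl; exact h (by decide)
  have ni : 'i' ≠ ch := by rintro rfl; exact h (by decide)
  have nj : 'j' ≠ ch := by rintro rfl; exact h (by decide)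
  have nk : 'k' ≠ ch := by rintro rfl; exact h (by decide)
  have nl : 'l' ≠ ch := by rintro rfl; exact h (by decide)
  have nm : 'm' ≠ ch := by rintro rfl; exact h (by decide)
  have nn : 'n' ≠ ch := by rintro rfl; exact h (by decide)
  have no : 'o' ≠ ch := by rintro rfl; exact h (by decide)
  have np : 'p' ≠ ch := by rintro rfl; exact h (by decide)
  have nq : 'q' ≠ ch := by rintro rfl; exact h (by decide)
  have nr : 'r' ≠ ch := by rintro rfl; exact h (by decide)
  have ns : 's' ≠ ch := by rintro rfl; exact h (by decide)
  have nt : 't' ≠ ch := by rintro rfl; exact h (by decide)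
  have nu : 'u' ≠ ch := by rintro rfl; exact h (by decide)
  have nv : 'v' ≠ ch := by rintro rfl; exact h (by decide)
  have nw : 'w' ≠ ch := by rintro rfl; exact h (by decide)
  have nx : 'x' ≠ ch := by rintro rfl; exact h (by decide)
  have ny : 'y' ≠ ch := by rintro rfl; exact h (by decide)
  have nz : 'z' ≠ ch := by rintro rfl; exact h (by decide)
  simp [ofMem, na, nb, nc, nd, ne, nf, ng, nh, ni, nj, nk, nl, nm, nn, no, np, nq, nr, ns, nt, nu, nv, nw, nx, ny, nz]

theorem stepA_ofMem (cs : List Char) (ch : Char) :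
    stepA (ofMem cs) ch = ofMem (cs ++ [ch]) := by
  by_cases hch : ch ∈ alphabet
  · fin_cases hch <;> simp [stepA, ofMem]
  · unfold stepA
    rw [if_neg (show ¬(ch = 'a') from fun hh => hch (by rw [hh]; decide))]
    rw [if_neg (show ¬(ch = 'b') from fun hh => hch (by rw [hh]; decide))]
    rw [if_neg (show ¬(ch = 'c') from fun hh => hch (by rw [hh]; decide))]
    rw [if_neg (show ¬(ch = 'd') from fun hh => hch (by rw [hh]; decide))]
    rw [if_neg (show ¬(ch = 'e') from fun hh => hch (by rw [hh]; decide))]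
    rw [if_neg (show ¬(ch = 'f') from fun hh => hch (by rw [hh]; decide))]
    rw [if_neg (show ¬(ch = 'g') from fun hh => hch (by rw [hh]; decide))]
    rw [if_neg (show ¬(ch = 'h') from fun hh => hch (by rw [hh]; decide))]
    rw [if_neg (show ¬(ch = 'i') from fun hh => hch (by rw [hh]; decide))]
    rw [if_neg (show ¬(ch = 'j') from fun hh => hch (by rw [hh]; decide))]
    rw [if_neg (show ¬(ch = 'k') from fun hh => hch (by rw [hh]; decide))]
    rw [if_neg (show ¬(ch = 'l') from fun hh => hch (by rw [hh]; decide))]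
    rw [if_neg (show ¬(ch = 'm') from fun hh => hch (by rw [hh]; decide))]
    rw [if_neg (show ¬(ch = 'n') from fun hh => hch (by rw [hh]; decide))]
    rw [if_neg (show ¬(ch = 'o') from fun hh => hch (by rw [hh]; decide))]
    rw [if_neg (show ¬(ch = 'p') from fun hh => hch (by rw [hh]; decide))]
    rw [if_neg (show ¬(ch = 'q') from fun hh => hch (by rw [hh]; decide))]
    rw [if_neg (show ¬(ch = 'r') from fun hh => hch (by rw [hh]; decide))]
    rw [if_neg (show ¬(ch = 's') from fun hh => hch (by rw [hh]; decide))]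
    rw [if_neg (show ¬(ch = 't') from fun hh => hch (by rw [hh]; decide))]
    rw [if_neg (show ¬(ch = 'u') from fun hh => hch (by rw [hh]; decide))]
    rw [if_neg (show ¬(ch = 'v') from fun hh => hch (by rw [hh]; decide))]
    rw [if_neg (show ¬(ch = 'w') from fun hh => hch (by rw [hh]; decide))]
    rw [if_neg (show ¬(ch = 'x') from fun hh => hch (by rw [hh]; decide))]
    rw [if_neg (show ¬(ch = 'y') from fun hh => hch (by rw [hh]; decide))]
    rw [if_neg (show ¬(ch = 'z') from fun hh => hch (by rw [hh]; decide))]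
    exact (ofMem_append_not_letter cs ch (fun hb => hch ((mem_alphabet ch).mpr hb))).symm

theorem foldA_ofMem (l : List Char) : ∀ cs : List Char, l.foldl stepA (ofMem cs) = ofMem (cs ++ l) := by
  induction l with
  | nil => intro cs; simp
  | cons x xs ih =>
    intro cs
    rw [List.foldl_cons, stepA_ofMem, ih]
    simp

theorem initA_eq : initA = ofMem [] := by decide

theorem sumA_ofMem (cs : List Char) :
    retA (ofMem cs) = ((alphabet.countP (fun c => decide (c ∈ cs)) : Nat) : Int) := by
  unfold retA
  have hm : ((ofMem cs).a + (ofMem cs).b + (ofMem cs).c + (ofMem cs).d + (ofMem cs).e + (ofMem cs).f + (ofMem cs).g + (ofMem cs).h + (ofMem cs).i + (ofMem cs).j + (ofMem cs).k + (ofMem cs).l + (ofMem cs).m + (ofMem cs).n + (ofMem cs).o + (ofMem cs).p + (ofMem cs).q + (ofMem cs).r + (ofMem cs).s + (ofMem cs).t + (ofMem cs).u + (ofMem cs).v + (ofMem cs).w + (ofMem cs).x + (ofMem cs).y + (ofMem cs).z) =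
      (List.map (fun c => if c ∈ cs then (1 : Int) else 0) alphabet).sum := by
    simp [ofMem, alphabet]; ring
  rw [hm]
  have hs := PySem.List.sum_map_ite_one_zero (fun c => decide (c ∈ cs)) alphabet
  simp only [decide_eq_true_eq] at hs
  exact hs

theorem foldB_count (p : Char → Bool) (l : List Char) : ∀ acc : Int,
    l.foldl (fun acc c => if p c then acc + 1 else acc) acc = acc + (l.countP p : Nat) := by
  induction l with
  | nil => intro acc; simp
  | cons x xs ih =>
    intro acc
    by_cases hx : p x = true
    · rw [List.foldl_cons, if_pos hx, ih, List.countP_cons, if_pos hx]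
      push_cast; ring
    · rw [List.foldl_cons, if_neg hx, ih, List.countP_cons, if_neg hx]
      simp

theorem isIn_singleton (c : Char) (s : String) :
    PySem.Str.isIn (String.ofList [c]) s = true ↔ c ∈ s.toList := by
  rw [PySem.Str.isIn_iff_infix]
  have ht : (String.ofList [c]).toList = [c] := by simp
  rw [ht, List.singleton_infix_iff]

theorem any_iff_mem_flatten (group : List String) (c : Char) :
    group.any (fun s => PySem.Str.isIn (String.ofList [c]) s) = true ↔
      c ∈ (group.map String.toList).flatten := by
  rw [List.any_eq_true]
  simp only [isIn_singleton, List.mem_flatten, List.mem_map]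
  constructor
  · rintro ⟨s, hs, hc⟩
    exact ⟨s.toList, ⟨s, hs, rfl⟩, hc⟩
  · rintro ⟨l, ⟨s, hs, rfl⟩, hc⟩
    exact ⟨s, hs, hc⟩

-- ===== VERDICT =====
theorem count_group_or_spec : Claim_equal_count_group_or := by
  intro group _
  unfold Spec_count_group_or
  have hinner : ∀ (st : FlagsA) (answers : String),
      (PySem.List.pyRange 0 (PySem.Str.len answers) 1).foldl
        (fun st secondIteration => stepA st (PySem.List.pyGetD answers.toList secondIteration ' ')) st
        = answers.toList.foldl stepA st := by
    intro st answers
    rw [PySem.Str.len_eq, PySem.List.foldl_pyRange_zero_pyGetD' answers.toList ' ' stepA st]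
  simp only [count_group_or, count_group_or_alt, hinner]
  rw [PySem.List.foldl_pyRange_zero_pyGetD group "" (fun st answers => answers.toList.foldl stepA st) initA]
  have hfold : group.foldl (fun st s => s.toList.foldl stepA st) initA
      = ((group.map String.toList).flatten).foldl stepA initA := by
    rw [List.foldl_flatten, List.foldl_map]
  rw [hfold, initA_eq, foldA_ofMem]
  simp only [List.nil_append]
  set cs := (group.map String.toList).flatten with hcs
  rw [sumA_ofMem, foldB_count]
  have hp : (fun letter => group.any (fun s => PySem.Str.isIn (String.ofList [letter]) s))
      = (fun c => decide (c ∈ cs)) := by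
    funext c
    rw [Bool.eq_iff_iff, decide_eq_true_eq, any_iff_mem_flatten]
  rw [hp]
  simp
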